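-- pv_equiv track=rewrite | github.com/ariuk44/retake_exam_prep | day_13.py | isCentered
-- ===== SOURCE A (Python) =====
-- def isCentered(arr):
--     n = len(arr)
--     if n % 2 == 0 or n == 0:
--         return 0
--     mid = n // 2
--     mid_value = arr[mid]
--     for i in range(n):
--         if i != mid and arr[i] <= mid_value:
--             return 0
--     return 1
-- ===== SOURCE B (Python) =====
-- def isCentered(arr):
--     n = len(arr)
--     if n % 2 == 0 or n == 0:
--         return 0
--     m = min(arr)
--     return 1 if arr[n // 2] == m and arr.count(m) == 1 else 0
-- ===== Notes on version B (the rewrite author's own statement) =====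
-- stated objective: simpler
-- what changed: Replaces the index loop with an early exit (compare every other element to the pivot) by a single check that the middle element is the unique global minimum, via min(arr) and arr.count(m).
import Mathlib
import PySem

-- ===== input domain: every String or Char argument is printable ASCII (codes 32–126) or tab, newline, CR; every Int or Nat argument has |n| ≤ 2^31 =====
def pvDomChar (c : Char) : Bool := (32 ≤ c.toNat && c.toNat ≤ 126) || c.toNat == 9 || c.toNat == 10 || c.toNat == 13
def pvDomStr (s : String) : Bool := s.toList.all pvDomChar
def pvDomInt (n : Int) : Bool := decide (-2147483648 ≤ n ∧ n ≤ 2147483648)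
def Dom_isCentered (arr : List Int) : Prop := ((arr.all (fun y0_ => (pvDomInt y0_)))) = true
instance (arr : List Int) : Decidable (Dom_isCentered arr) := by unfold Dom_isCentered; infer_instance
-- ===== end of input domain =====

-- B replaces A's early-exit comparison loop by checking that the middle element is the
-- unique global minimum (min + count); objective: simpler.

-- ===== PORT A =====
-- the for-loop with its early `return 0`, as a recursion over the index i
def isCenteredLoopA (arr : List Int) (mid : Nat) (mv : Int) (i : Nat) : Int :=
  if _h : i < arr.length then
    if i ≠ mid ∧ arr.getD i 0 ≤ mv then 0
    else isCenteredLoopA arr mid mv (i + 1)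
  else 1
termination_by arr.length - i

def isCentered (arr : List Int) : Int :=
  let n := arr.length
  if n % 2 == 0 || n == 0 then 0
  else
    let mid := n / 2
    let mid_value := arr.getD mid 0   -- arr[mid]; mid < n here, so in range (getD default unreachable)
    isCenteredLoopA arr mid mid_value 0

-- ===== PORT B =====
def isCentered_alt (arr : List Int) : Int :=
  let n := arr.length
  if n % 2 == 0 || n == 0 then 0
  else
    match PySem.List.min? arr (fun x => x) with   -- min(arr); arr nonempty here
    | none => 0                                   -- unreachable
    | some m =>
      if PySem.List.pyGet? arr ((n / 2 : Nat) : Int) = some m ∧ PySem.List.count arr m = 1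
      then 1 else 0

-- ===== PRECONDITION & SPEC =====
def Spec_isCentered (arr : List Int) (out : Int) : Prop := out = isCentered_alt arr
instance (arr : List Int) (out : Int) : Decidable (Spec_isCentered arr out) := by unfold Spec_isCentered; infer_instance

-- ===== CLAIM (what is proved, stated in full; the proofs are below) =====
def Claim_equal_isCentered : Prop := ∀ (arr : List Int), Dom_isCentered arr → Spec_isCentered arr (isCentered arr)

-- ===== LEMMAS AND PROOFS =====

-- loop characterisation: the early-exit loop tests "every index ≥ i other than mid is > mv"
theorem loopA_eq (arr : List Int) (mid : Nat) (mv : Int) (i : Nat) :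
    isCenteredLoopA arr mid mv i =
      if ∀ j, j < arr.length → i ≤ j → j ≠ mid → mv < arr.getD j 0 then 1 else 0 := by
  rw [isCenteredLoopA]
  by_cases hi : i < arr.length
  · simp only [hi, dif_pos]
    by_cases hbad : i ≠ mid ∧ arr.getD i 0 ≤ mv
    · rw [if_pos hbad, if_neg]
      intro hP
      exact absurd (hP i hi le_rfl hbad.1) (not_lt.mpr hbad.2)
    · rw [if_neg hbad, loopA_eq]
      congr 1
      apply propext
      constructor
      · intro hP j hj hij hjm
        rcases Nat.lt_or_ge j (i + 1) with h | h
        · have hji : j = i := by omega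
          subst hji
          rcases not_and_or.mp hbad with h' | h'
          · exact absurd hjm (by simpa using h')
          · exact lt_of_not_ge h'
        · exact hP j hj h hjm
      · intro hP j hj hij hjm
        exact hP j hj (by omega) hjm
  · simp only [hi, dif_neg, not_false_iff]
    rw [if_pos]
    intro j hj hij _
    omega
termination_by arr.length - i
decreasing_by omega

-- membership form of the loop condition, over the decomposition l ++ mv :: r with mid = l.length
theorem idx_iff_mem (l r : List Int) (mv : Int) :
    (∀ j, j < (l ++ mv :: r).length → 0 ≤ j → j ≠ l.length → mv < (l ++ mv :: r).getD j 0)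
    ↔ ((∀ x ∈ l, mv < x) ∧ (∀ x ∈ r, mv < x)) := by
  have hlen : (l ++ mv :: r).length = l.length + 1 + r.length := by simp; omega
  constructor
  · intro h
    constructor
    · intro x hx
      obtain ⟨j, hj, rfl⟩ := List.mem_iff_getElem.mp hx
      have := h j (by omega) (Nat.zero_le _) (by omega)
      rwa [List.getD_append _ _ _ _ hj, List.getD_eq_getElem _ _ hj] at this
    · intro x hx
      obtain ⟨k, hk, rfl⟩ := List.mem_iff_getElem.mp hx
      have := h (l.length + 1 + k) (by omega) (Nat.zero_le _) (by omega)
      rw [List.getD_append_right _ _ _ _ (by omega),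
          show l.length + 1 + k - l.length = k + 1 by omega,
          List.getD_cons_succ] at this
      rwa [List.getD_eq_getElem _ _ hk] at this
  · rintro ⟨hl, hr⟩ j hj _ hjm
    rcases Nat.lt_trichotomy j l.length with h | h | h
    · rw [List.getD_append _ _ _ _ h, List.getD_eq_getElem _ _ h]
      exact hl _ (List.getElem_mem h)
    · exact absurd h hjm
    · rw [List.getD_append_right _ _ _ _ (by omega),
          show j - l.length = (j - l.length - 1) + 1 by omega]
      have hk : j - l.length - 1 < r.length := by omega
      rw [List.getD_eq_getElem (mv :: r) _ (by simpa using Nat.succ_lt_succ hk)]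
      simp only [List.getElem_cons_succ]
      exact hr _ (List.getElem_mem hk)

-- the core equivalence: "strictly smallest except at mid" ⇔ "unique global minimum at mid"
theorem key_iff (l r : List Int) (mv m : Int)
    (hmem : m ∈ l ++ mv :: r) (hmin : ∀ y ∈ l ++ mv :: r, m ≤ y) :
    ((∀ x ∈ l, mv < x) ∧ (∀ x ∈ r, mv < x))
    ↔ (mv = m ∧ (l ++ mv :: r).count m = 1) := by
  constructor
  · rintro ⟨hl, hr⟩
    have hmv : mv = m := by
      rcases List.mem_append.mp hmem with h | h
      · exact absurd (hmin mv (by simp)) (not_le.mpr (hl m h))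
      · rcases List.mem_cons.mp h with h | h
        · exact h.symm
        · exact absurd (hmin mv (by simp)) (not_le.mpr (hr m h))
    subst hmv
    refine ⟨rfl, ?_⟩
    have hcl : l.count mv = 0 := List.count_eq_zero.mpr fun h => lt_irrefl mv (hl mv h)
    have hcr : r.count mv = 0 := List.count_eq_zero.mpr fun h => lt_irrefl mv (hr mv h)
    simp [List.count_append, hcl, hcr]
  · rintro ⟨rfl, hcount⟩
    rw [List.count_append, List.count_cons_self] at hcount
    have hcl : mv ∉ l := by
      intro h
      have := List.count_pos_iff.mpr h
      omega
    have hcr : mv ∉ r := by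
      intro h
      have := List.count_pos_iff.mpr h
      omega
    constructor
    · intro x hx
      have hle := hmin x (by simp [hx])
      rcases lt_or_eq_of_le hle with h | h
      · exact h
      · exact absurd (h ▸ hx) hcl
    · intro x hx
      have hle := hmin x (by simp [hx])
      rcases lt_or_eq_of_le hle with h | h
      · exact h
      · exact absurd (h ▸ hx) hcr

-- ===== VERDICT (by name: the statement is the Claim_ definition above) =====
theorem isCentered_spec : Claim_equal_isCentered := by
  intro arr _
  unfold Spec_isCentered isCentered isCentered_alt
  by_cases hg : arr.length % 2 == 0 || arr.length == 0
  · simp [hg]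
  · simp only [hg, if_neg, Bool.false_eq_true, not_false_iff]
    have hne : arr ≠ [] := by
      intro h; subst h; simp at hg
    have hmid : arr.length / 2 < arr.length := by
      have : 0 < arr.length := List.length_pos_iff.mpr hne
      omega
    set mid := arr.length / 2 with hmiddef
    set mv := arr.getD mid 0 with hmv
    have hget : arr.getD mid 0 = arr[mid] := List.getD_eq_getElem _ _ hmid
    have hdrop : arr.drop mid = arr[mid] :: arr.drop (mid + 1) := List.drop_eq_getElem_cons hmid
    have harr : arr = arr.take mid ++ mv :: arr.drop (mid + 1) := by
      rw [hmv, hget, ← hdrop, List.take_append_drop]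
    have hlen : (arr.take mid).length = mid := List.length_take_of_le (Nat.le_of_lt hmid)
    obtain ⟨m, hm⟩ : ∃ m, PySem.List.min? arr (fun x => x) = some m := by
      cases h : PySem.List.min? arr (fun x => x) with
      | none => exact absurd ((PySem.List.min?_eq_none_iff arr (fun x => x)).mp h) hne
      | some m => exact ⟨m, rfl⟩
    have hmem : m ∈ arr := PySem.List.min?_mem hm
    have hmin : ∀ y ∈ arr, m ≤ y := PySem.List.min?_isMin hm
    rw [hm, loopA_eq]
    have hPy : PySem.List.pyGet? arr ((mid : Nat) : Int) = some arr[mid] := by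
      simp [PySem.List.pyGet?_natCast, List.getElem?_eq_getElem hmid]
    have hcnt : PySem.List.count arr m = List.count m arr := PySem.List.count_eq arr m
    -- B's condition restated
    have hBcond : (PySem.List.pyGet? arr ((mid : Nat) : Int) = some m ∧ PySem.List.count arr m = 1)
        ↔ (mv = m ∧ List.count m arr = 1) := by
      rw [hPy, hcnt, hmv, hget]
      constructor
      · rintro ⟨h1, h2⟩; exact ⟨Option.some_injective _ h1, h2⟩
      · rintro ⟨h1, h2⟩; exact ⟨by rw [h1], h2⟩
    -- chain the characterisations
    have h1 := idx_iff_mem (arr.take mid) (arr.drop (mid + 1)) mv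
    rw [hlen, ← harr] at h1
    have hmem' : m ∈ arr.take mid ++ mv :: arr.drop (mid + 1) := harr ▸ hmem
    have hmin' : ∀ y ∈ arr.take mid ++ mv :: arr.drop (mid + 1), m ≤ y := by
      intro y hy; exact hmin y (harr ▸ hy)
    have h2 := key_iff (arr.take mid) (arr.drop (mid + 1)) mv m hmem' hmin'
    rw [← harr] at h2
    have hiff := h1.trans h2
    show (if ∀ j, j < arr.length → 0 ≤ j → j ≠ mid → mv < arr.getD j 0 then (1 : Int) else 0)
        = if PySem.List.pyGet? arr ((mid : Nat) : Int) = some m ∧ PySem.List.count arr m = 1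
          then 1 else 0
    by_cases hc : ∀ j, j < arr.length → 0 ≤ j → j ≠ mid → mv < arr.getD j 0
    · rw [if_pos hc, if_pos (hBcond.mpr (hiff.mp hc))]
    · rw [if_neg hc, if_neg (fun h => hc (hiff.mpr (hBcond.mp h)))]
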